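-- pv_equiv track=rewrite | github.com/armanjtehrani/water-engineering | cost_optimization.py | build_region_source_by
-- ===== SOURCE A (Python) =====
-- def build_region_source_by(region_sink):
--     region_source = {}
--     for sink in region_sink:
--         for src in region_sink[sink]:
--             if src not in region_source:
--                 region_source[src] = [sink]
--             else:
--                 src_sink = region_source[src]
--                 if sink not in src_sink:
--                     region_source[src].append(sink)
--     return region_source
-- ===== SOURCE B (Python) =====
-- def build_region_source_by(region_sink):
--     # Transposed traversal: compute the sources in first-occurrence order, then for each
--     # source collect, by one scan over the mapping, the sinks whose list mentions it.
--     order = dict.fromkeys(src for sinks in region_sink.values() for src in sinks)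
--     items = [(sink, set(sinks)) for sink, sinks in region_sink.items()]
--     return {src: [sink for sink, ss in items if src in ss] for src in order}
-- ===== Notes on version B (the rewrite author's own statement) =====
-- stated objective: alternative
-- what changed: A inverts the mapping event by event in one nested pass, mutating a dict and deduplicating each sink list with a membership scan while building; B never builds by mutation: it computes the source keys in first-occurrence order and then, for each source, produces its whole sink list at once by filtering the mapping by set membership (a column-wise transpose), so no dedup of sink lists is needed at all.
import Mathlib
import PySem

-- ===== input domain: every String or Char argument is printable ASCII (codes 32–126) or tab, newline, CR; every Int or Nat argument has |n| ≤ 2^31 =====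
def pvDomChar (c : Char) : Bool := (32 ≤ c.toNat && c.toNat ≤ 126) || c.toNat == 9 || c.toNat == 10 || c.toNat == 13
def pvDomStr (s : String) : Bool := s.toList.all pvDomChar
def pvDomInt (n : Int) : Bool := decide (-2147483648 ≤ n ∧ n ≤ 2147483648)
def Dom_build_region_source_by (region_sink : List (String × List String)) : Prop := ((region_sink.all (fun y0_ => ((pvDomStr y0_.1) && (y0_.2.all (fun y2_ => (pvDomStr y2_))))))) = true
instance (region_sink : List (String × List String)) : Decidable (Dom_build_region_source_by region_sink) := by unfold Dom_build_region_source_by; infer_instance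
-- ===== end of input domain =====

-- B transposes the traversal: it computes the source keys in first-occurrence order and then
-- builds each source's sink list by one filter over the mapping, with no dict mutation and no
-- per-event dedup; objective: alternative (same result, different algorithm, not faster).

-- ===== PORT A =====
-- `for sink in region_sink: for src in region_sink[sink]:` visits the dict's (key, value)
-- items in order; ported as the fold over the association list's pairs.
def build_region_source_by (region_sink : List (String × List String)) : List (String × List String) :=
  (region_sink.foldl (fun d p =>
      p.2.foldl (fun d src =>
        match PySem.Dict.get? d src with
        | none => d.insert src [p.1]
        | some src_sink => if p.1 ∈ src_sink then d else d.insert src (src_sink ++ [p.1]))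
        d)
    PySem.Dict.empty).items

-- ===== PORT B =====
-- order = dict.fromkeys(generator over all sources) → PySem.List.dedup of the flattened values;
-- items = [(sink, set(sinks)) …] → a map building PySem.Set.ofList; the dict comprehension over
-- `order` (distinct keys) → a map; `[sink for sink, ss in items if src in ss]` → filter (set
-- membership = PySem.Set.contains) then map Prod.fst.
def build_region_source_by_alt (region_sink : List (String × List String)) : List (String × List String) :=
  let order := PySem.List.dedup (region_sink.flatMap (fun p => p.2))
  let items := region_sink.map (fun p => (p.1, PySem.Set.ofList p.2))
  order.map (fun src => (src, (items.filter (fun q => PySem.Set.contains q.2 src)).map Prod.fst))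

-- ===== PRECONDITION & SPEC =====
-- Pre_ excludes association lists with duplicate sink keys: a Python dict has unique keys, so
-- such lists do not represent any input A can receive; A returns on every dict.
def Pre_build_region_source_by (region_sink : List (String × List String)) : Prop :=
  (region_sink.map Prod.fst).Nodup
instance (region_sink : List (String × List String)) : Decidable (Pre_build_region_source_by region_sink) := by unfold Pre_build_region_source_by; infer_instance

def pvWitness_build_region_source_by : (List (String × List String)) :=
  [("a", ["x", "y"]), ("b", ["x"])]

def Spec_build_region_source_by (region_sink : List (String × List String)) (out : List (String × List String)) : Prop := out = build_region_source_by_alt region_sink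
instance (region_sink : List (String × List String)) (out : List (String × List String)) : Decidable (Spec_build_region_source_by region_sink out) := by unfold Spec_build_region_source_by; infer_instance

-- ===== CLAIM (what is proved, stated in full; the proofs are below) =====
def Claim_equal_build_region_source_by : Prop := ∀ (region_sink : List (String × List String)), Dom_build_region_source_by region_sink → Pre_build_region_source_by region_sink → Spec_build_region_source_by region_sink (build_region_source_by region_sink)

-- ===== LEMMAS AND PROOFS =====

-- A's inner-loop body for one (sink, src) event (the port's inline lambda, named)
def pvStepA (sink : String) (d : PySem.Dict String (List String)) (src : String) :
    PySem.Dict String (List String) :=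
  match PySem.Dict.get? d src with
  | none => d.insert src [sink]
  | some src_sink => if sink ∈ src_sink then d else d.insert src (src_sink ++ [sink])

-- B's value for one source
def pvVal (rs : List (String × List String)) (src : String) : List String :=
  (rs.filter (fun p => src ∈ p.2)).map Prod.fst

def pvTarget (rs : List (String × List String)) : List (String × List String) :=
  (PySem.List.dedup (rs.flatMap (fun p => p.2))).map (fun src => (src, pvVal rs src))

-- dict state in the middle of A's inner loop: events X already seen in full, prefix u of the
-- current sink's source list processed
def pvM (sink : String) (g : String → List String) (X u : List String) :
    List (String × List String) :=
  (PySem.List.dedup (X ++ u)).map (fun s => (s, g s ++ if s ∈ u then [sink] else []))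

lemma pvB_eq (rs : List (String × List String)) : build_region_source_by_alt rs = pvTarget rs := by
  unfold build_region_source_by_alt pvTarget pvVal
  refine List.map_congr_left (fun src _ => ?_)
  refine congrArg (Prod.mk src) ?_
  rw [List.filter_map]
  have hpred : (fun q : String × PySem.Set String => PySem.Set.contains q.2 src) ∘
      (fun p : String × List String => (p.1, PySem.Set.ofList p.2)) =
      (fun p : String × List String => decide (src ∈ p.2)) := by
    funext p
    by_cases h : src ∈ p.2
    · simp [Function.comp, PySem.Set.contains,
        (PySem.Set.mem_ofList p.2 src).mpr h, h]
    · simp [Function.comp, PySem.Set.contains, h]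
  rw [hpred, List.map_map]
  rfl

lemma pv_dedup_snoc (v : List String) (x : String) :
    PySem.List.dedup (v ++ [x]) =
      if x ∈ PySem.List.dedup v then PySem.List.dedup v else PySem.List.dedup v ++ [x] := by
  simp only [PySem.List.dedup, PySem.Set.ofList, List.foldl_append, List.foldl_cons,
    List.foldl_nil, PySem.Set.add, PySem.Set.contains]
  by_cases h : x ∈ List.foldl PySem.Set.add PySem.Set.empty v
  · rw [if_pos (List.contains_iff_mem.mpr h), if_pos h]
  · rw [if_neg (fun hc => h (List.contains_iff_mem.mp hc)), if_neg h]

lemma pv_get?_map (X : List String) (f : String → List String) (k : String) :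
    PySem.Dict.get? (PySem.Dict.mk (X.map (fun s => (s, f s)))) k =
      if k ∈ X then some (f k) else none := by
  induction X with
  | nil => simp [PySem.Dict.get?]
  | cons x xs ih =>
    rw [List.map_cons, PySem.Dict.get?_mk_cons]
    by_cases h : x = k
    · subst h; simp
    · have hb : (x == k) = false := by simpa using h
      have hk : ¬ k = x := fun he => h he.symm
      simp [hb, ih, hk]

lemma pv_contains_map (X : List String) (f : String → List String) (k : String) :
    PySem.Dict.contains (PySem.Dict.mk (X.map (fun s => (s, f s)))) k = decide (k ∈ X) := by
  induction X with
  | nil => simp [PySem.Dict.contains]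
  | cons x xs ih =>
    by_cases h : x = k
    · subst h; simp [PySem.Dict.contains]
    · have hb : (x == k) = false := by simpa using h
      have hk : ¬ k = x := fun he => h he.symm
      simp [PySem.Dict.contains, hb, hk] at ih ⊢
      simpa [PySem.Dict.contains] using ih

lemma pv_insert_map_mem (X : List String) (f : String → List String) (k : String)
    (w : List String) (hk : k ∈ X) :
    (PySem.Dict.mk (X.map (fun s => (s, f s)))).insert k w =
      PySem.Dict.mk (X.map (fun s => (s, if s = k then w else f s))) := by
  have hc : PySem.Dict.contains (PySem.Dict.mk (X.map (fun s => (s, f s)))) k = true := by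
    rw [pv_contains_map]; simpa using hk
  simp only [PySem.Dict.insert, hc, if_true]
  congr 1
  rw [List.map_map]
  refine List.map_congr_left (fun s _ => ?_)
  by_cases h : s = k
  · subst h; simp
  · have hb : (s == k) = false := by simpa using h
    simp [Function.comp, hb, h]

lemma pv_insert_map_notmem (X : List String) (f : String → List String) (k : String)
    (w : List String) (hk : k ∉ X) :
    (PySem.Dict.mk (X.map (fun s => (s, f s)))).insert k w =
      PySem.Dict.mk (X.map (fun s => (s, f s)) ++ [(k, w)]) := by
  have hc : PySem.Dict.contains (PySem.Dict.mk (X.map (fun s => (s, f s)))) k = false := by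
    rw [pv_contains_map]; simpa using hk
  simp [PySem.Dict.insert, hc]

lemma pv_sink_not_mem_val (rs : List (String × List String)) (sink src : String)
    (h : sink ∉ rs.map Prod.fst) : sink ∉ pvVal rs src := by
  intro hm
  obtain ⟨p, hp, hps⟩ := List.mem_map.mp hm
  exact h (List.mem_map.mpr ⟨p, List.mem_of_mem_filter hp, hps⟩)

lemma pv_val_nil (rs : List (String × List String)) (src : String)
    (h : src ∉ rs.flatMap (fun p => p.2)) : pvVal rs src = [] := by
  unfold pvVal
  rw [List.filter_eq_nil_iff.mpr, List.map_nil]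
  intro p hp
  simp only [decide_eq_true_eq]
  exact fun hm => h (List.mem_flatMap.mpr ⟨p, hp, hm⟩)

lemma pvVal_append (l : List (String × List String)) (p : String × List String) (s : String) :
    pvVal (l ++ [p]) s = pvVal l s ++ if s ∈ p.2 then [p.1] else [] := by
  by_cases h : s ∈ p.2 <;> simp [pvVal, List.filter_append, h]

lemma pvStep_one (sink : String) (g : String → List String) (X u : List String) (s : String)
    (hg : ∀ t, sink ∉ g t) (hgX : ∀ t, t ∉ X → g t = []) :
    pvStepA sink (PySem.Dict.mk (pvM sink g X u)) s = PySem.Dict.mk (pvM sink g X (u ++ [s])) := by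
  have hMu : pvM sink g X u =
      (PySem.List.dedup (X ++ u)).map (fun t => (t, g t ++ if t ∈ u then [sink] else [])) := rfl
  have hassoc : X ++ (u ++ [s]) = (X ++ u) ++ [s] := (List.append_assoc X u [s]).symm
  by_cases hmem : s ∈ X ++ u
  · have hd : s ∈ PySem.List.dedup (X ++ u) := (PySem.List.mem_dedup _ _).mpr hmem
    have hded : PySem.List.dedup (X ++ (u ++ [s])) = PySem.List.dedup (X ++ u) := by
      rw [hassoc, pv_dedup_snoc, if_pos hd]
    have hget : PySem.Dict.get? (PySem.Dict.mk (pvM sink g X u)) s =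
        some (g s ++ if s ∈ u then [sink] else []) := by
      rw [hMu, pv_get?_map, if_pos hd]
    by_cases hsu : s ∈ u
    · -- sink already recorded for s: A leaves the dict unchanged
      have hin : sink ∈ g s ++ if s ∈ u then [sink] else [] := by simp [hsu]
      have : pvStepA sink (PySem.Dict.mk (pvM sink g X u)) s =
          PySem.Dict.mk (pvM sink g X u) := by
        unfold pvStepA; rw [hget]; simp [hin]
      rw [this]
      unfold pvM
      rw [hded]
      refine congrArg _ (List.map_congr_left (fun t _ => ?_))
      by_cases hts : t = s
      · subst hts; simp [hsu]
      · have : (t ∈ u ++ [s]) ↔ t ∈ u := by simp [hts]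
        simp [this]
    · -- key s present, sink not yet in its list: in-place append
      have hnin : sink ∉ g s ++ if s ∈ u then [sink] else [] := by
        simp [hsu]; exact hg s
      have : pvStepA sink (PySem.Dict.mk (pvM sink g X u)) s =
          (PySem.Dict.mk (pvM sink g X u)).insert s
            ((g s ++ if s ∈ u then [sink] else []) ++ [sink]) := by
        unfold pvStepA; rw [hget]; simp [hnin]
      rw [this, hMu, pv_insert_map_mem _ _ _ _ hd]
      unfold pvM
      rw [hded]
      refine congrArg _ (List.map_congr_left (fun t _ => ?_))
      by_cases hts : t = s
      · subst hts; simp [hsu]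
      · have h2 : (t ∈ u ++ [s]) ↔ t ∈ u := by simp [hts]
        simp [hts, h2]
  · -- new key: appended at the end with value [sink]
    have hsX : s ∉ X := fun h => hmem (List.mem_append.mpr (Or.inl h))
    have hsu : s ∉ u := fun h => hmem (List.mem_append.mpr (Or.inr h))
    have hd : s ∉ PySem.List.dedup (X ++ u) := fun h => hmem ((PySem.List.mem_dedup _ _).mp h)
    have hded : PySem.List.dedup (X ++ (u ++ [s])) = PySem.List.dedup (X ++ u) ++ [s] := by
      rw [hassoc, pv_dedup_snoc, if_neg hd]
    have hget : PySem.Dict.get? (PySem.Dict.mk (pvM sink g X u)) s = none := by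
      rw [hMu, pv_get?_map, if_neg hd]
    have : pvStepA sink (PySem.Dict.mk (pvM sink g X u)) s =
        (PySem.Dict.mk (pvM sink g X u)).insert s [sink] := by
      unfold pvStepA; rw [hget]
    rw [this, hMu, pv_insert_map_notmem _ _ _ _ hd]
    unfold pvM
    rw [hded, List.map_append]
    have h1 : List.map (fun t => (t, g t ++ if t ∈ u ++ [s] then [sink] else []))
        (PySem.List.dedup (X ++ u)) =
        List.map (fun t => (t, g t ++ if t ∈ u then [sink] else []))
          (PySem.List.dedup (X ++ u)) := by
      refine List.map_congr_left (fun t ht => ?_)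
      have hts : t ≠ s := fun he => hd (he ▸ ht)
      have h2 : (t ∈ u ++ [s]) ↔ t ∈ u := by simp [hts]
      simp [h2]
    have h2 : List.map (fun t => (t, g t ++ if t ∈ u ++ [s] then [sink] else [])) [s] =
        [(s, [sink])] := by simp [hgX s hsX]
    rw [h1, h2]

lemma pvInnerAux (sink : String) (g : String → List String) (X : List String)
    (hg : ∀ t, sink ∉ g t) (hgX : ∀ t, t ∉ X → g t = []) :
    ∀ (srcs u : List String),
      srcs.foldl (pvStepA sink) (PySem.Dict.mk (pvM sink g X u)) =
        PySem.Dict.mk (pvM sink g X (u ++ srcs)) := by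
  intro srcs
  induction srcs with
  | nil => intro u; simp
  | cons s ss ih =>
    intro u
    rw [List.foldl_cons, pvStep_one sink g X u s hg hgX, ih (u ++ [s]), List.append_assoc]
    rfl

lemma pvOuter : ∀ (rs : List (String × List String)), (rs.map Prod.fst).Nodup →
    rs.foldl (fun d p => p.2.foldl (pvStepA p.1) d) PySem.Dict.empty =
      PySem.Dict.mk (pvTarget rs) := by
  intro rs
  induction rs using List.reverseRecOn with
  | nil => intro _; rfl
  | append_singleton l p ih =>
    intro hnd
    rw [List.map_append, List.map_singleton] at hnd
    have hnd' : (l.map Prod.fst).Nodup := hnd.of_append_left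
    have hp1 : p.1 ∉ l.map Prod.fst := fun hm =>
      (List.nodup_append.mp hnd).2.2 p.1 hm p.1 (List.mem_singleton_self _) rfl
    have hg : ∀ t, p.1 ∉ pvVal l t := fun t => pv_sink_not_mem_val l p.1 t hp1
    have hgX : ∀ t, t ∉ l.flatMap (fun q => q.2) → pvVal l t = [] := fun t => pv_val_nil l t
    have hM0 : PySem.Dict.mk (pvTarget l) =
        PySem.Dict.mk (pvM p.1 (fun t => pvVal l t) (l.flatMap (fun q => q.2)) []) := by
      unfold pvTarget pvM; simp
    have hMend : pvTarget (l ++ [p]) =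
        pvM p.1 (fun t => pvVal l t) (l.flatMap (fun q => q.2)) p.2 := by
      unfold pvTarget pvM
      simp only [List.flatMap_append, List.flatMap_cons, List.flatMap_nil, List.append_nil,
        pvVal_append]
    rw [List.foldl_append, ih hnd', List.foldl_cons, List.foldl_nil, hM0,
      pvInnerAux p.1 (fun t => pvVal l t) (l.flatMap (fun q => q.2)) hg hgX p.2 [], hMend]
    rfl

-- ===== VERDICT (by name: the statement is the Claim_ definition above) =====
theorem build_region_source_by_spec : Claim_equal_build_region_source_by := by
  intro rs _ hpre
  unfold Spec_build_region_source_by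
  show (rs.foldl (fun d p => p.2.foldl (pvStepA p.1) d) PySem.Dict.empty).items =
    build_region_source_by_alt rs
  rw [pvOuter rs hpre, pvB_eq]
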